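-- pv_equiv track=rewrite | github.com/payel-bhunia/pythonProgramming | contest/replace.py | solve
-- ===== SOURCE A (Python) =====
-- def solve(A, B):
--     hash_map = {}
--     for i in range(len(B)):
--         if B[i][0] != B[i][1]:
--             hash_map[B[i][0]] = B[i][1]
--
--     i = 0
--     while i < len(A):
--         if A[i] in hash_map:
--             A[i] = hash_map[A[i]]
--         else:
--             i += 1
--     return A
-- ===== SOURCE B (Python) =====
-- def solve(A, B):
--     # Build the replacement map (skip self-maps, last occurrence of a key wins),
--     # then resolve each key to its terminal value once (memoized with path
--     # compression) and substitute in a single pass.  Mutates A in place like the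
--     # original.
--     m = {}
--     for k, v in B:
--         if k != v:
--             m[k] = v
--     memo = {}
--
--     def resolve(x):
--         path = []
--         while x in m and x not in memo:
--             path.append(x)
--             x = m[x]
--         t = memo.get(x, x)
--         for p in path:
--             memo[p] = t
--         return t
--
--     A[:] = [resolve(x) for x in A]
--     return A
-- ===== Notes on version B (the rewrite author's own statement) =====
-- stated objective: alternative
-- what changed: A repeatedly rewrites each position of A in place, re-walking the replacement chain link by link at every position; B resolves each key to its terminal value once with a memoized (path-compressed) chain walk and substitutes in a single pass.
import Mathlib
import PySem

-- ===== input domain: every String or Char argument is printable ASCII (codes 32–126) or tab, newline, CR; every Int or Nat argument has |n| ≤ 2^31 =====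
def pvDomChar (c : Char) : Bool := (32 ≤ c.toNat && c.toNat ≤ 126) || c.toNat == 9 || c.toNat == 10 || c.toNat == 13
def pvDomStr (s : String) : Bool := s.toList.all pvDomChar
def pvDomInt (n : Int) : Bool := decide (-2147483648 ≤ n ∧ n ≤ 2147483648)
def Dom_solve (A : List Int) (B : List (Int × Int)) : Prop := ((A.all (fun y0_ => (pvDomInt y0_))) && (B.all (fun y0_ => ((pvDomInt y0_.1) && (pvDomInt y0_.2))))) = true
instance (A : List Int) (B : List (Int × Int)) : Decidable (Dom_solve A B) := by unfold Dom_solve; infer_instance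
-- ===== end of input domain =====

-- B resolves each key to its terminal value once (memoized chain walk) and substitutes in a
-- single pass, instead of A's in-place rewrite loop; equivalence is about the RETURN value
-- (both Pythons also mutate the argument list A in place to the same final content).

-- ===== PORT A =====
-- shared helper: the dict built by the first loop of BOTH Pythons (skip self-maps, last key wins)
def pvMap (B : List (Int × Int)) : PySem.Dict Int Int :=
  B.foldl (fun d p => if p.1 ≠ p.2 then d.insert p.1 p.2 else d) PySem.Dict.empty

-- A's while-loop: replace A[i] while it is a key, else advance i.  The fuel
-- A.length * (size+1) only makes the recursion total; inside Pre_solve it is never exhausted.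
def solveLoop (m : PySem.Dict Int Int) : Nat → List Int → Nat → List Int
  | 0, A, _ => A
  | fuel+1, A, i =>
    if i < A.length then
      match m.get? (A.getD i 0) with
      | some v => solveLoop m fuel (A.set i v) i
      | none => solveLoop m fuel A (i+1)
    else A

def solve (A : List Int) (B : List (Int × Int)) : List Int :=
  let m := pvMap B
  solveLoop m (A.length * (m.size + 1)) A 0

-- ===== PORT B =====
-- Source B's inner `while x in m and x not in memo` loop; on exit it writes the terminal value t
-- for every key on the walked path into memo.  Fuel size+1 is never exhausted inside Pre_solve.
def resolveLoop (m : PySem.Dict Int Int) :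
    Nat → List Int → PySem.Dict Int Int → Int → Int × PySem.Dict Int Int
  | 0, path, memo, x =>
    let t := memo.getD x x
    (t, path.foldl (fun d p => d.insert p t) memo)
  | fuel+1, path, memo, x =>
    if m.contains x && !(memo.contains x) then
      resolveLoop m fuel (path ++ [x]) memo (m.getD x x)   -- m.getD x x = m[x] here (x is a key)
    else
      let t := memo.getD x x
      (t, path.foldl (fun d p => d.insert p t) memo)

def solve_alt (A : List Int) (B : List (Int × Int)) : List Int :=
  let m := pvMap B
  (A.foldl (fun acc x =>
      let r := resolveLoop m (m.size + 1) [] acc.2 x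
      (acc.1 ++ [r.1], r.2)) (([] : List Int), (PySem.Dict.empty : PySem.Dict Int Int))).1

-- ===== PRECONDITION & SPEC =====
-- one step of chained replacement (identity off the keys)
def pvStep (m : PySem.Dict Int Int) (x : Int) : Int := m.getD x x

-- Pre_solve excludes EXACTLY the inputs on which the Python A never returns: some element of A
-- reaches a cycle of the replacement map, so A's while-loop rewrites that position forever.
-- "the chain from a terminates" is stated as: after size-many steps one is off the keys.
def Pre_solve (A : List Int) (B : List (Int × Int)) : Prop :=
  ∀ a ∈ A, (pvMap B).contains ((pvStep (pvMap B))^[(pvMap B).size] a) = false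
instance (A : List Int) (B : List (Int × Int)) : Decidable (Pre_solve A B) := by
  unfold Pre_solve; infer_instance

def pvWitness_solve : List Int × (List (Int × Int)) := ([1, 5, 2], [(1, 2), (2, 3), (4, 4)])

def Spec_solve (A : List Int) (B : List (Int × Int)) (out : List Int) : Prop := out = solve_alt A B
instance (A : List Int) (B : List (Int × Int)) (out : List Int) : Decidable (Spec_solve A B out) := by unfold Spec_solve; infer_instance

-- ===== CLAIM (what is proved, stated in full; the proofs are below) =====
def Claim_equal_solve : Prop := ∀ (A : List Int) (B : List (Int × Int)), Dom_solve A B → Pre_solve A B → Spec_solve A B (solve A B)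

-- ===== LEMMAS AND PROOFS =====

-- the terminal value of the chain starting at x (reached within size steps inside Pre_solve)
def pvTerm (m : PySem.Dict Int Int) (x : Int) : Int := (pvStep m)^[m.size] x

lemma pvStep_fix (m : PySem.Dict Int Int) (x : Int) (h : m.contains x = false) :
    pvStep m x = x := by
  unfold pvStep
  exact PySem.Dict.getD_of_not_contains m x h

lemma pvStep_stable (m : PySem.Dict Int Int) (x : Int) (n : Nat)
    (h : m.contains ((pvStep m)^[n] x) = false) :
    ∀ j, (pvStep m)^[n + j] x = (pvStep m)^[n] x := by
  intro j
  induction j with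
  | zero => rfl
  | succ j ih =>
      have hnj : n + (j + 1) = (n + j) + 1 := by omega
      rw [hnj, Function.iterate_succ_apply', ih, pvStep_fix m _ h]

lemma pvTerm_eq_iterate (m : PySem.Dict Int Int) (x : Int) (n : Nat)
    (h : m.contains ((pvStep m)^[n] x) = false) (hn : n ≤ m.size) :
    pvTerm m x = (pvStep m)^[n] x := by
  have hs := pvStep_stable m x n h (m.size - n)
  have hsz : n + (m.size - n) = m.size := by omega
  rw [hsz] at hs
  simpa [pvTerm] using hs

lemma pvTerm_step (m : PySem.Dict Int Int) (x : Int) (n : Nat)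
    (h : m.contains ((pvStep m)^[n] x) = false) (hn : n ≤ m.size) :
    pvTerm m (pvStep m x) = pvTerm m x := by
  have hx : pvTerm m x = (pvStep m)^[n] x := pvTerm_eq_iterate m x n h hn
  have h1 : (pvStep m)^[n] (pvStep m x) = (pvStep m)^[n] x := by
    rw [← Function.iterate_succ_apply]
    have hs := pvStep_stable m x n h 1
    simpa [Nat.add_comm] using hs
  have h1' : m.contains ((pvStep m)^[n] (pvStep m x)) = false := by rw [h1]; exact h
  rw [pvTerm_eq_iterate m (pvStep m x) n h1' hn, h1, hx]

lemma pvTerm_fix (m : PySem.Dict Int Int) (x : Int) (h : m.contains x = false) :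
    pvTerm m x = x := by
  have hs := pvStep_stable m x 0 (by simpa using h) m.size
  simpa [pvTerm] using hs

lemma solveLoop_exit (m : PySem.Dict Int Int) (fuel : Nat) (A : List Int) (i : Nat)
    (h : A.length ≤ i) : solveLoop m fuel A i = A := by
  cases fuel with
  | zero => rfl
  | succ f => simp [solveLoop, Nat.not_lt.mpr h]

lemma drop_set_of_lt (A : List Int) (i : Nat) (v : Int) (j : Nat) (h : i < j) :
    (A.set i v).drop j = A.drop j := by
  apply List.ext_getElem
  · simp
  · intro k h1 h2
    simp only [List.getElem_drop]
    rw [List.getElem_set_ne (by omega)]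

lemma take_set_of_le (A : List Int) (i : Nat) (v : Int) (j : Nat) (h : j ≤ i) :
    (A.set i v).take j = A.take j := by
  apply List.ext_getElem
  · simp
  · intro k h1 h2
    simp only [List.length_take, List.length_set] at h1 h2
    simp only [List.getElem_take]
    rw [List.getElem_set_ne (by omega)]

lemma solveLoop_spec (m : PySem.Dict Int Int) :
    ∀ fuel n (A : List Int) (i : Nat),
      i < A.length →
      m.contains ((pvStep m)^[n] (A.getD i 0)) = false →
      n ≤ m.size →
      (∀ a ∈ A.drop (i+1), m.contains (pvTerm m a) = false) →
      n + 1 + (A.length - (i+1)) * (m.size + 1) ≤ fuel →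
      solveLoop m fuel A i = A.take i ++ (A.drop i).map (pvTerm m) := by
  intro fuel
  induction fuel with
  | zero => intro n A i _ _ _ _ hf; omega
  | succ fuel ih =>
      intro n A i hi hterm hn hrest hf
      have hx : A.getD i 0 = A[i] := List.getD_eq_getElem A 0 hi
      have hdropi : A.drop i = A[i] :: A.drop (i+1) := List.drop_eq_getElem_cons hi
      simp only [solveLoop, if_pos hi]
      cases hget : m.get? (A.getD i 0) with
      | some v =>
          have hcont : m.contains (A.getD i 0) = true := by
            rw [PySem.Dict.contains_eq_isSome_get?, hget]; rfl
          have hstep : pvStep m (A.getD i 0) = v := by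
            unfold pvStep; exact PySem.Dict.getD_of_get?_eq_some m _ hget
          show solveLoop m fuel (A.set i v) i = A.take i ++ (A.drop i).map (pvTerm m)
          cases n with
          | zero =>
              simp only [Function.iterate_zero_apply] at hterm
              rw [hterm] at hcont; cases hcont
          | succ n' =>
              have hterm' : m.contains ((pvStep m)^[n'] v) = false := by
                rw [← hstep, ← Function.iterate_succ_apply]; exact hterm
              have hset : (A.set i v).getD i 0 = v := by
                rw [List.getD_eq_getElem _ 0 (by simpa using hi), List.getElem_set_self]
              have ihres := ih n' (A.set i v) i (by simpa using hi)
                (by rw [hset]; exact hterm') (by omega)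
                (by rw [drop_set_of_lt A i v (i+1) (by omega)]; exact hrest)
                (by simp only [List.length_set]; omega)
              have hdropset : (A.set i v).drop i = v :: A.drop (i+1) := by
                rw [List.drop_eq_getElem_cons (by simpa using hi)]
                rw [List.getElem_set_self, drop_set_of_lt A i v (i+1) (by omega)]
              have htermv : pvTerm m v = pvTerm m A[i] := by
                rw [← hx, ← hstep]
                exact pvTerm_step m (A.getD i 0) (n'+1) hterm (by omega)
              rw [ihres, take_set_of_le A i v i (le_refl i), hdropset, hdropi]
              simp only [List.map_cons, htermv]
      | none =>
          have hcont : m.contains (A.getD i 0) = false := by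
            rw [PySem.Dict.contains_eq_isSome_get?, hget]; rfl
          show solveLoop m fuel A (i+1) = A.take i ++ (A.drop i).map (pvTerm m)
          have htermx : pvTerm m A[i] = A[i] := by
            rw [← hx]; exact pvTerm_fix m _ hcont
          by_cases hi1 : i + 1 < A.length
          · have ihres := ih m.size A (i+1) hi1
              (by
                have hmem : A.getD (i+1) 0 ∈ A.drop (i+1) := by
                  rw [List.getD_eq_getElem A 0 hi1, List.drop_eq_getElem_cons hi1]
                  exact List.mem_cons_self
                exact hrest _ hmem)
              (le_refl _)
              (by
                intro a ha
                have hdd : A.drop (i+2) = (A.drop (i+1)).drop 1 := by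
                  rw [List.drop_drop]
                exact hrest a (List.mem_of_mem_drop (by rw [← hdd]; exact ha)))
              (by
                have hexp : (A.length - (i+1)) = (A.length - (i+1+1)) + 1 := by omega
                have hmul : (A.length - (i+1)) * (m.size + 1)
                     = (A.length - (i+1+1)) * (m.size + 1) + (m.size + 1) := by
                  rw [hexp, Nat.succ_mul]
                omega)
            rw [ihres]
            have htake : A.take (i+1) = A.take i ++ [A[i]] := by
              rw [List.take_succ, List.getElem?_eq_getElem hi]; rfl
            rw [htake, hdropi]
            simp only [List.map_cons, htermx, List.append_assoc, List.cons_append,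
              List.nil_append]
          · rw [solveLoop_exit m fuel A (i+1) (by omega)]
            have hdrop1 : A.drop (i+1) = [] := List.drop_eq_nil_of_le (by omega)
            conv_lhs => rw [← List.take_append_drop i A]
            rw [hdropi, hdrop1]
            simp [htermx]

-- characterisation of A's port
lemma solve_eq_map (A : List Int) (B : List (Int × Int)) (hpre : Pre_solve A B) :
    solve A B = A.map (pvTerm (pvMap B)) := by
  unfold solve
  set m := pvMap B with hm
  cases A with
  | nil => simp [solveLoop]
  | cons x xs =>
      have hlen : 0 < (x :: xs).length := by simp
      have hterm : m.contains ((pvStep m)^[m.size] ((x :: xs).getD 0 0)) = false :=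
        hpre x List.mem_cons_self
      have hres := solveLoop_spec m ((x :: xs).length * (m.size + 1)) m.size (x :: xs) 0
        hlen hterm (le_refl _)
        (by intro a ha; exact hpre a (List.mem_cons_of_mem x (by simpa using ha)))
        (by
          have hmul : (x :: xs).length * (m.size + 1)
              = ((x :: xs).length - (0+1)) * (m.size + 1) + (m.size + 1) := by
            have hL : (x :: xs).length = ((x :: xs).length - (0+1)) + 1 := by simp
            conv_lhs => rw [hL]
            rw [Nat.succ_mul]
          omega)
      simpa using hres

-- memo invariant for B
def MemoInv (m memo : PySem.Dict Int Int) : Prop :=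
  ∀ k v, memo.get? k = some v → v = pvTerm m k

lemma get?_foldl_insert_const (path : List Int) :
    ∀ (memo : PySem.Dict Int Int) (t k : Int),
      (path.foldl (fun d p => d.insert p t) memo).get? k
        = if k ∈ path then some t else memo.get? k := by
  induction path with
  | nil => intro memo t k; simp
  | cons p ps ih =>
      intro memo t k
      simp only [List.foldl_cons, ih]
      rw [PySem.Dict.get?_insert]
      by_cases hk : k ∈ ps <;> by_cases hkp : k = p <;> simp [hk, hkp]

lemma resolveLoop_spec (m : PySem.Dict Int Int) :
    ∀ fuel n (path : List Int) (memo : PySem.Dict Int Int) (x : Int),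
      MemoInv m memo →
      m.contains ((pvStep m)^[n] x) = false →
      n ≤ m.size → n < fuel →
      (∀ p ∈ path, pvTerm m p = pvTerm m x) →
      (resolveLoop m fuel path memo x).1 = pvTerm m x ∧
        MemoInv m (resolveLoop m fuel path memo x).2 := by
  intro fuel
  induction fuel with
  | zero => intro n path memo x _ _ _ hf; omega
  | succ fuel ih =>
      intro n path memo x hinv hterm hn hf hpath
      simp only [resolveLoop]
      by_cases hcond : (m.contains x && !(memo.contains x)) = true
      · rw [if_pos hcond]
        have hcx : m.contains x = true := by
          have h := hcond; simp only [Bool.and_eq_true] at h; exact h.1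
        cases n with
        | zero =>
            simp only [Function.iterate_zero_apply] at hterm
            rw [hterm] at hcx; cases hcx
        | succ n' =>
            have hterm' : m.contains ((pvStep m)^[n'] (m.getD x x)) = false := by
              show m.contains ((pvStep m)^[n'] (pvStep m x)) = false
              rw [← Function.iterate_succ_apply]; exact hterm
            have htermeq : pvTerm m (m.getD x x) = pvTerm m x := by
              show pvTerm m (pvStep m x) = pvTerm m x
              exact pvTerm_step m x (n'+1) hterm (by omega)
            have hres := ih n' (path ++ [x]) memo (m.getD x x) hinv hterm'
              (by omega) (by omega)
              (by
                intro p hp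
                rw [htermeq]
                rcases List.mem_append.mp hp with h | h
                · exact hpath p h
                · simp at h; subst h; rfl)
            exact ⟨hres.1.trans htermeq, hres.2⟩
      · rw [if_neg hcond]
        have ht : memo.getD x x = pvTerm m x := by
          cases hget : memo.get? x with
          | some v =>
              rw [PySem.Dict.getD_of_get?_eq_some memo x hget]
              exact hinv x v hget
          | none =>
              have hmc : memo.contains x = false := by
                rw [PySem.Dict.contains_eq_isSome_get?, hget]; rfl
              have hcx : m.contains x = false := by
                cases hcm : m.contains x
                · rfl
                · exact absurd (by simp [hcm, hmc]) hcond
              rw [PySem.Dict.getD_of_get?_eq_none memo x hget]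
              exact (pvTerm_fix m x hcx).symm
        refine ⟨ht, ?_⟩
        intro k v hget
        simp only at hget
        rw [get?_foldl_insert_const path memo (memo.getD x x) k] at hget
        split_ifs at hget with hk
        · have hv : memo.getD x x = v := Option.some.inj hget
          rw [← hv, ht]
          exact (hpath k hk).symm
        · exact hinv k v hget

lemma foldB_spec (m : PySem.Dict Int Int) :
    ∀ (A : List Int) (acc : List Int) (memo : PySem.Dict Int Int),
      MemoInv m memo →
      (∀ a ∈ A, m.contains ((pvStep m)^[m.size] a) = false) →
      (A.foldl (fun acc x =>
          let r := resolveLoop m (m.size + 1) [] acc.2 x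
          (acc.1 ++ [r.1], r.2)) (acc, memo)).1 = acc ++ A.map (pvTerm m) := by
  intro A
  induction A with
  | nil => intro acc memo _ _; simp
  | cons x xs ih =>
      intro acc memo hinv hA
      have hx := hA x List.mem_cons_self
      have hres := resolveLoop_spec m (m.size + 1) m.size [] memo x hinv hx
        (le_refl _) (by omega) (by intro p hp; simp at hp)
      simp only [List.foldl_cons]
      rw [ih (acc ++ [(resolveLoop m (m.size + 1) [] memo x).1])
            (resolveLoop m (m.size + 1) [] memo x).2 hres.2
            (fun a ha => hA a (List.mem_cons_of_mem x ha))]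
      rw [hres.1]
      simp

lemma solve_alt_eq_map (A : List Int) (B : List (Int × Int)) (hpre : Pre_solve A B) :
    solve_alt A B = A.map (pvTerm (pvMap B)) := by
  unfold solve_alt
  have hres := foldB_spec (pvMap B) A [] PySem.Dict.empty
    (by intro k v hget; rw [PySem.Dict.get?_empty] at hget; cases hget)
    (by intro a ha; exact hpre a ha)
  simpa using hres

-- ===== VERDICT (by name: the statement is the Claim_ definition above) =====
theorem solve_spec : Claim_equal_solve := by
  intro A B _ hpre
  unfold Spec_solve
  rw [solve_eq_map A B hpre, solve_alt_eq_map A B hpre]
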